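-- pv_equiv track=rewrite | github.com/daffodil7/coding-test | programmers/DAY6.py | solution
-- ===== SOURCE A (Python) =====
-- def solution(n):
--     answer = 0
--     for i in range(1,n+1):
--         count=0
--         for j in range(1,i+1):
--             if i%j==0:
--                 count += 1
--             if count >= 3:
--                 answer += 1
--     return answer
-- ===== SOURCE B (Python) =====
-- def solution(n):
--     # For each i, only the third-smallest divisor matters: once the inner count
--     # of A reaches 3 at j = d3, every later j adds 1, contributing i - d3 + 1.
--     # Find d3 by enumerating divisors only up to sqrt(i) (pairing d with i//d).
--     total = 0
--     for i in range(1, n + 1):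
--         small = []
--         d = 1
--         while d * d <= i:
--             if i % d == 0:
--                 small.append(d)
--             d += 1
--         divs = small + [i // e for e in reversed(small) if e * e != i]
--         if len(divs) >= 3:
--             total += i - divs[2] + 1
--     return total
-- ===== Notes on version B (the rewrite author's own statement) =====
-- stated objective: faster
-- what changed: A counts, for every i, each inner position j at which the running divisor count has reached three; B enumerates divisors of i only up to sqrt(i) (pairing each small divisor d with i//d), reads off the third-smallest divisor d3, and adds the closed form i - d3 + 1.
import Mathlib
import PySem

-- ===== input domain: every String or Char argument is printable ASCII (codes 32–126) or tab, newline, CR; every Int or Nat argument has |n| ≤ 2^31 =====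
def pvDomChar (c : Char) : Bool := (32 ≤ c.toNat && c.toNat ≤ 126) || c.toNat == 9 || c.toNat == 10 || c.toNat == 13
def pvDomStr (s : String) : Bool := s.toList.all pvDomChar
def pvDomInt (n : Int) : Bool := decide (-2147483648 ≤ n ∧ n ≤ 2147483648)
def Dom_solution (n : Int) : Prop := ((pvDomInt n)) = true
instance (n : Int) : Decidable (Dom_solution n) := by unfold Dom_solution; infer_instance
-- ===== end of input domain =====

-- B replaces A's full inner scan by sqrt-bounded divisor enumeration plus the closed form
-- i - d3 + 1 (d3 = third-smallest divisor); measurably faster.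


-- ===== PORT A =====
def solution (n : Int) : Int :=
  ((PySem.List.pyRange 1 (n + 1) 1).foldl (fun answer i =>
    ((PySem.List.pyRange 1 (i + 1) 1).foldl (fun (s : Int × Int) j =>
        let count := if PySem.Int.mod i j = 0 then s.1 + 1 else s.1
        (count, if count ≥ 3 then s.2 + 1 else s.2)) (0, answer)).2) 0)

-- ===== PORT B =====
-- the 'while d * d <= i: … d += 1' loop collecting the divisors of i up to sqrt(i);
-- fuel (i + 1 - d).toNat only makes the recursion structural: while d * d ≤ i and
-- 1 ≤ d we have d ≤ i, so the fuel never runs out before the loop test fails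
def smallDivsGo (i : Int) (d : Int) : Nat → List Int
  | 0 => []
  | fuel + 1 =>
    if d * d ≤ i then
      (if PySem.Int.mod i d = 0 then d :: smallDivsGo i (d + 1) fuel
       else smallDivsGo i (d + 1) fuel)
    else []

def smallDivs (i : Int) (d : Int) : List Int := smallDivsGo i d (i + 1 - d).toNat

def solution_alt (n : Int) : Int :=
  (PySem.List.pyRange 1 (n + 1) 1).foldl (fun total i =>
    let small := smallDivs i 1
    let divs := small ++ (small.reverse.filter (fun e => !(e * e == i))).map
        (fun e => PySem.Int.floordiv i e)
    if divs.length ≥ 3 then total + (i - divs.getD 2 0 + 1) else total) 0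

-- ===== PRECONDITION & SPEC =====
def Spec_solution (n : Int) (out : Int) : Prop := out = solution_alt n
instance (n : Int) (out : Int) : Decidable (Spec_solution n out) := by unfold Spec_solution; infer_instance

-- ===== CLAIM (what is proved, stated in full; the proofs are below) =====
def Claim_equal_solution : Prop := ∀ (n : Int), Dom_solution n → Spec_solution n (solution n)

-- ===== LEMMAS AND PROOFS =====

theorem pv_eq_of_perm_of_lt {l1 l2 : List Int} (h : l1.Perm l2)
    (h1 : l1.Pairwise (·<·)) (h2 : l2.Pairwise (·<·)) : l1 = l2 :=
  h.eq_of_pairwise (fun _ _ _ _ hab hba => le_antisymm hab hba)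
    (h1.imp le_of_lt) (h2.imp le_of_lt)

-- mirror of A's inner loop body as a pure recursion
def pvContrib (i : Int) : List Int → Int → Int
  | [], _ => 0
  | j :: tl, c =>
    (if (if PySem.Int.mod i j = 0 then c + 1 else c) ≥ 3 then 1 else 0)
      + pvContrib i tl (if PySem.Int.mod i j = 0 then c + 1 else c)

-- number of elements of L from the t-th divisor of i (inclusive) to the end
def pvAfter (i : Int) : Nat → List Int → Nat
  | _, [] => 0
  | t, j :: tl =>
    if PySem.Int.mod i j = 0 then (if t ≤ 1 then tl.length + 1 else pvAfter i (t-1) tl)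
    else pvAfter i t tl

-- the full (increasing) divisor list of i that A's inner loop filters out
def pvF (i : Int) : List Int :=
  (PySem.List.pyRange 1 (i + 1) 1).filter (fun j => decide (PySem.Int.mod i j = 0))

-- the list B builds for i
def pvDivs (i : Int) : List Int :=
  smallDivs i 1 ++ ((smallDivs i 1).reverse.filter (fun e => !(e * e == i))).map
      (fun e => PySem.Int.floordiv i e)

theorem pv_foldl_inner (i : Int) (L : List Int) (c a : Int) :
    (L.foldl (fun (s : Int × Int) j =>
        let count := if PySem.Int.mod i j = 0 then s.1 + 1 else s.1
        (count, if count ≥ 3 then s.2 + 1 else s.2)) (c, a)).2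
      = a + pvContrib i L c := by
  induction L generalizing c a with
  | nil => simp [pvContrib]
  | cons j tl ih =>
    simp only [List.foldl_cons, pvContrib, ih]
    split_ifs <;> ring

theorem pv_contrib_ge3 (i : Int) (L : List Int) (c : Int) (h : 3 ≤ c) :
    pvContrib i L c = L.length := by
  induction L generalizing c with
  | nil => simp [pvContrib]
  | cons j tl ih =>
    simp only [pvContrib]
    by_cases hm : PySem.Int.mod i j = 0 <;>
      · simp only [hm, if_true, if_false]
        rw [if_pos (by omega), ih _ (by omega)]
        simp only [List.length_cons]
        push_cast
        ring

theorem pv_contrib_lt3 (i : Int) (L : List Int) (c : Int) (h : c < 3) :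
    pvContrib i L c = ((pvAfter i (3 - c).toNat L : Nat) : Int) := by
  induction L generalizing c with
  | nil => simp [pvContrib, pvAfter]
  | cons j tl ih =>
    simp only [pvContrib, pvAfter]
    by_cases hm : PySem.Int.mod i j = 0
    · simp only [hm, if_true]
      by_cases h3 : c + 1 ≥ 3
      · have hc : c = 2 := by omega
        subst hc
        simp only [h3, if_true]
        rw [pv_contrib_ge3 i tl (2 + 1) (by omega)]
        norm_num
        omega
      · have ht : ¬ ((3 - c).toNat ≤ 1) := by omega
        have ht2 : (3 - c).toNat - 1 = (3 - (c+1)).toNat := by omega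
        simp only [h3, if_false, if_neg ht, ht2]
        rw [ih _ (by omega)]
        ring
    · have h3 : ¬ (c ≥ 3) := by omega
      simp only [hm, if_false, if_neg h3]
      rw [ih _ h]
      ring

theorem pv_after_range (i : Int) (t : Nat) (ht : 1 ≤ t) (a : Int) :
    ((pvAfter i t (PySem.List.pyRange a (i + 1) 1) : Nat) : Int)
      = if t ≤ ((PySem.List.pyRange a (i + 1) 1).filter
            (fun j => decide (PySem.Int.mod i j = 0))).length then
          i + 1 - ((PySem.List.pyRange a (i + 1) 1).filter
            (fun j => decide (PySem.Int.mod i j = 0))).getD (t - 1) 0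
        else 0 := by
  suffices h : ∀ (k : Nat) (a : Int), (i + 1 - a).toNat = k → ∀ (t : Nat), 1 ≤ t →
      ((pvAfter i t (PySem.List.pyRange a (i + 1) 1) : Nat) : Int)
        = if t ≤ ((PySem.List.pyRange a (i + 1) 1).filter
            (fun j => decide (PySem.Int.mod i j = 0))).length then
            i + 1 - ((PySem.List.pyRange a (i + 1) 1).filter
              (fun j => decide (PySem.Int.mod i j = 0))).getD (t - 1) 0 else 0 by
    exact h _ a rfl t ht
  intro k
  induction k with
  | zero =>
    intro a ha t ht1
    rw [PySem.List.pyRange_one_eq_nil (by omega)]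
    simp [pvAfter]
    omega
  | succ k ih =>
    intro a ha t ht1
    rw [PySem.List.pyRange_one_cons (by omega)]
    have hrest : (i + 1 - (a + 1)).toNat = k := by omega
    by_cases hm : PySem.Int.mod i a = 0
    · simp only [pvAfter, List.filter_cons, hm, decide_true, if_true]
      by_cases h1 : t ≤ 1
      · have ht0 : t = 1 := by omega
        subst ht0
        simp only [List.length_cons]
        rw [PySem.List.length_pyRange_one, if_pos (by omega)]
        norm_num
        omega
      · rw [if_neg h1, ih (a + 1) hrest (t - 1) (by omega)]
        rcases Nat.exists_eq_add_of_le (show 2 ≤ t by omega) with ⟨m, hmeq⟩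
        subst hmeq
        simp only [List.length_cons]
        have h2 : 2 + m - 1 = m + 1 := by omega
        rw [h2, List.getD_cons_succ]
        simp only [Nat.add_sub_cancel]
        split_ifs with h3 h4 <;> first | rfl | omega
    · simp only [pvAfter, List.filter_cons, hm, decide_false, if_false]
      exact ih (a + 1) hrest t ht1

-- ===== B-side: pvDivs i is the sorted divisor list pvF i =====

theorem pv_sq_mono {a b : Int} (ha : 1 ≤ a) (hab : a ≤ b) : a * a ≤ b * b :=
  mul_le_mul hab hab (by omega) (by omega)

theorem pv_mem_smallDivsGo (i : Int) : ∀ (k : Nat) (d : Int), (i + 1 - d).toNat ≤ k → 1 ≤ d →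
    ∀ x, (x ∈ smallDivsGo i d k ↔ d ≤ x ∧ x * x ≤ i ∧ PySem.Int.mod i x = 0) := by
  intro k
  induction k with
  | zero =>
    intro d hk hd x
    have hdd : ¬ (d * d ≤ i) := by
      intro hc
      have : d ≤ d * d := le_mul_of_one_le_left (by omega) hd
      omega
    simp only [smallDivsGo, List.not_mem_nil, false_iff]
    rintro ⟨hdx, hxx, -⟩
    exact hdd (le_trans (pv_sq_mono hd hdx) hxx)
  | succ k ih =>
    intro d hk hd x
    by_cases hdd : d * d ≤ i
    · have hdi : d ≤ i := le_trans (le_mul_of_one_le_left (by omega) hd) hdd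
      have hrest := ih (d + 1) (by omega) (by omega)
      rw [smallDivsGo, if_pos hdd]
      by_cases hm : PySem.Int.mod i d = 0
      · rw [if_pos hm]
        simp only [List.mem_cons, hrest]
        constructor
        · rintro (rfl | ⟨h1, h2, h3⟩)
          · exact ⟨le_refl _, hdd, hm⟩
          · exact ⟨by omega, h2, h3⟩
        · rintro ⟨h1, h2, h3⟩
          rcases eq_or_lt_of_le h1 with rfl | h1'
          · exact Or.inl rfl
          · exact Or.inr ⟨by omega, h2, h3⟩
      · rw [if_neg hm, hrest]
        constructor
        · rintro ⟨h1, h2, h3⟩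
          exact ⟨by omega, h2, h3⟩
        · rintro ⟨h1, h2, h3⟩
          refine ⟨?_, h2, h3⟩
          rcases eq_or_lt_of_le h1 with rfl | h1'
          · exact absurd h3 hm
          · omega
    · rw [smallDivsGo, if_neg hdd]
      simp only [List.not_mem_nil, false_iff]
      rintro ⟨hdx, hxx, -⟩
      exact hdd (le_trans (pv_sq_mono hd hdx) hxx)

theorem pv_mem_smallDivs (i : Int) (d : Int) (hd : 1 ≤ d) (x : Int) :
    x ∈ smallDivs i d ↔ d ≤ x ∧ x * x ≤ i ∧ PySem.Int.mod i x = 0 :=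
  pv_mem_smallDivsGo i _ d le_rfl hd x

theorem pv_smallDivsGo_ge (i : Int) : ∀ (k : Nat) (d x : Int), x ∈ smallDivsGo i d k → d ≤ x := by
  intro k
  induction k with
  | zero =>
    intro d x hx
    simp [smallDivsGo] at hx
  | succ k ih =>
    intro d x hx
    rw [smallDivsGo] at hx
    split_ifs at hx with h1 h2
    · rcases List.mem_cons.mp hx with rfl | hx'
      · exact le_refl x
      · have := ih (d + 1) x hx'
        omega
    · have := ih (d + 1) x hx
      omega
    · simp at hx

theorem pv_pairwise_smallDivsGo (i : Int) : ∀ (k : Nat) (d : Int), 1 ≤ d →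
    (smallDivsGo i d k).Pairwise (·<·) := by
  intro k
  induction k with
  | zero =>
    intro d hd
    exact List.Pairwise.nil
  | succ k ih =>
    intro d hd
    by_cases hdd : d * d ≤ i
    · have hrest := ih (d + 1) (by omega)
      rw [smallDivsGo, if_pos hdd]
      by_cases hm : PySem.Int.mod i d = 0
      · rw [if_pos hm]
        refine List.Pairwise.cons ?_ hrest
        intro y hy
        have := pv_smallDivsGo_ge i k (d + 1) y hy
        omega
      · rw [if_neg hm]
        exact hrest
    · rw [smallDivsGo, if_neg hdd]
      exact List.Pairwise.nil

theorem pv_pairwise_smallDivs (i : Int) (d : Int) (hd : 1 ≤ d) :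
    (smallDivs i d).Pairwise (·<·) :=
  pv_pairwise_smallDivsGo i _ d hd

-- the large-divisor pairing: e ↦ i // e
theorem pv_large_mem {i e : Int} (hi : 1 ≤ i) (he : 1 ≤ e) (hee : e * e ≤ i)
    (hne : e * e ≠ i) (hm : PySem.Int.mod i e = 0) :
    1 ≤ PySem.Int.floordiv i e ∧ PySem.Int.floordiv i e ≤ i ∧
      i < PySem.Int.floordiv i e * PySem.Int.floordiv i e ∧
      PySem.Int.mod i (PySem.Int.floordiv i e) = 0 := by
  have hdvd : e ∣ i := (PySem.Int.mod_eq_zero_iff_dvd i e).mp hm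
  rw [PySem.Int.floordiv_eq_ediv_of_pos (by omega)]
  set q := i / e with hq
  have hiq : e * q = i := Int.mul_ediv_cancel' hdvd
  have hq1 : 1 ≤ q := by nlinarith
  have hlt : e * e < i := lt_of_le_of_ne hee hne
  have heq : e < q := by nlinarith
  refine ⟨hq1, by nlinarith, by nlinarith, ?_⟩
  rw [PySem.Int.mod_eq_zero_iff_dvd]
  exact ⟨e, by linarith [hiq]⟩

theorem pv_mem_pvDivs (i : Int) (hi : 1 ≤ i) (x : Int) :
    x ∈ pvDivs i ↔ 1 ≤ x ∧ x ≤ i ∧ PySem.Int.mod i x = 0 := by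
  simp only [pvDivs, List.mem_append, List.mem_map, List.mem_filter, List.mem_reverse,
    pv_mem_smallDivs i 1 le_rfl, Bool.not_eq_eq_eq_not, Bool.not_true, beq_eq_false_iff_ne]
  constructor
  · rintro (⟨h1, h2, h3⟩ | ⟨e, ⟨⟨he1, he2, he3⟩, hne⟩, rfl⟩)
    · exact ⟨h1, by nlinarith, h3⟩
    · obtain ⟨q1, q2, _, q4⟩ := pv_large_mem hi he1 he2 hne he3
      exact ⟨q1, q2, q4⟩
  · rintro ⟨h1, h2, h3⟩
    by_cases hs : x * x ≤ i
    · exact Or.inl ⟨h1, hs, h3⟩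
    · right
      have hdvd : x ∣ i := (PySem.Int.mod_eq_zero_iff_dvd i x).mp h3
      obtain ⟨q, hq⟩ : ∃ q, q = i / x := ⟨i / x, rfl⟩
      have hiq : x * q = i := by rw [hq]; exact Int.mul_ediv_cancel' hdvd
      have hq1 : 1 ≤ q := by nlinarith
      refine ⟨q, ⟨⟨hq1, by nlinarith, ?_⟩, by nlinarith⟩, ?_⟩
      · rw [PySem.Int.mod_eq_zero_iff_dvd]
        exact ⟨x, by linarith [hiq]⟩
      · rw [PySem.Int.floordiv_eq_ediv_of_pos (by omega), ← hiq,
          Int.mul_ediv_cancel _ (by omega : q ≠ 0)]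

theorem pv_pairwise_pvDivs (i : Int) (hi : 1 ≤ i) : (pvDivs i).Pairwise (·<·) := by
  have hsm := pv_pairwise_smallDivs i 1 le_rfl
  have hmem : ∀ e, e ∈ smallDivs i 1 → 1 ≤ e ∧ e * e ≤ i ∧ PySem.Int.mod i e = 0 := by
    intro e he
    exact (pv_mem_smallDivs i 1 le_rfl e).mp he
  have hmemf : ∀ e, e ∈ (smallDivs i 1).reverse.filter (fun e => !(e * e == i)) →
      (1 ≤ e ∧ e * e ≤ i ∧ PySem.Int.mod i e = 0) ∧ e * e ≠ i := by
    intro e he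
    rw [List.mem_filter, List.mem_reverse] at he
    refine ⟨hmem e he.1, ?_⟩
    simpa using he.2
  rw [pvDivs, List.pairwise_append]
  refine ⟨hsm, ?_, ?_⟩
  · rw [List.pairwise_map]
    have h1 : ((smallDivs i 1).reverse.filter
        (fun e => !(e * e == i))).Pairwise (fun a b => b < a) :=
      (List.pairwise_reverse.mpr hsm).filter _
    refine h1.imp_of_mem ?_
    intro a b ha hb hab
    obtain ⟨⟨ha1, ha2, ha3⟩, -⟩ := hmemf a ha
    obtain ⟨⟨hb1, hb2, hb3⟩, -⟩ := hmemf b hb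
    have hda : a ∣ i := (PySem.Int.mod_eq_zero_iff_dvd i a).mp ha3
    have hdb : b ∣ i := (PySem.Int.mod_eq_zero_iff_dvd i b).mp hb3
    rw [PySem.Int.floordiv_eq_ediv_of_pos (by omega : (0:Int) < a),
      PySem.Int.floordiv_eq_ediv_of_pos (by omega : (0:Int) < b)]
    have hqa : a * (i / a) = i := Int.mul_ediv_cancel' hda
    have hqb : b * (i / b) = i := Int.mul_ediv_cancel' hdb
    have h1a : 1 ≤ i / a := by nlinarith
    by_contra hc
    push Not at hc
    nlinarith [mul_le_mul_of_nonneg_left hc (by omega : (0:Int) ≤ b)]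
  · intro x hx y hy
    obtain ⟨hx1, hx2, -⟩ := hmem x hx
    rw [List.mem_map] at hy
    obtain ⟨e, he, rfl⟩ := hy
    obtain ⟨⟨he1, he2, he3⟩, hne⟩ := hmemf e he
    obtain ⟨hy1, -, hyy, -⟩ := pv_large_mem hi he1 he2 hne he3
    nlinarith

theorem pv_mem_pvF (i : Int) (x : Int) :
    x ∈ pvF i ↔ 1 ≤ x ∧ x ≤ i ∧ PySem.Int.mod i x = 0 := by
  simp [pvF, PySem.List.mem_pyRange_one]
  omega

theorem pv_pairwise_pvF (i : Int) : (pvF i).Pairwise (·<·) :=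
  (PySem.List.pairwise_lt_pyRange_one 1 (i+1)).filter _

theorem pv_divs_eq (i : Int) (hi : 1 ≤ i) : pvDivs i = pvF i := by
  have hnd1 : (pvDivs i).Nodup := (pv_pairwise_pvDivs i hi).imp (fun h => ne_of_lt h)
  have hnd2 : (pvF i).Nodup := (pv_pairwise_pvF i).imp (fun h => ne_of_lt h)
  have hperm : (pvDivs i).Perm (pvF i) := by
    apply List.perm_of_nodup_nodup_toFinset_eq hnd1 hnd2
    ext x
    simp only [List.mem_toFinset, pv_mem_pvDivs i hi, pv_mem_pvF]
  exact pv_eq_of_perm_of_lt hperm (pv_pairwise_pvDivs i hi) (pv_pairwise_pvF i)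

theorem solution_eq_alt (n : Int) : solution n = solution_alt n := by
  unfold solution solution_alt
  apply PySem.List.foldl_congr_mem
  intro acc i hmem
  have hi1 : (1:Int) ≤ i := (PySem.List.mem_pyRange_one.mp hmem).1
  simp only []
  rw [pv_foldl_inner i _ 0 acc, pv_contrib_lt3 i _ 0 (by omega)]
  have h3 : ((3:Int) - 0).toNat = 3 := rfl
  rw [h3, pv_after_range i 3 (by omega) 1]
  have hF : (PySem.List.pyRange 1 (i + 1) 1).filter
      (fun j => decide (PySem.Int.mod i j = 0)) = pvF i := rfl
  have hB : (smallDivs i 1) ++ ((smallDivs i 1).reverse.filter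
      (fun e => !(e * e == i))).map (fun e => PySem.Int.floordiv i e) = pvF i := by
    rw [← pv_divs_eq i hi1]; rfl
  rw [hF, hB]
  split_ifs with h
  · ring
  · ring

-- ===== VERDICT (by name: the statement is the Claim_ definition above) =====
theorem solution_spec : Claim_equal_solution := by
  intro n _
  exact solution_eq_alt n
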